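-- pv_equiv track=rewrite | github.com/janetxinli/rosalind | fib.py | fib_rabbits
-- ===== SOURCE A (Python) =====
-- def fib_rabbits(months, litter):
--     """
--     Calculate the number of rabbit pairs present after months if each reproductive
--     pair produces a litter of size litter.
--     """
--     if months == 0:
--         return 0
--     elif months == 1:
--         return 1
--
--     # Every pair reproductive the month before will still be reproductive
--     reproductive = fib_rabbits(months - 1, litter)
--
--     # Every pair from two months ago will produce a litter
--     young = litter * fib_rabbits(months - 2, litter)
--     return reproductive + young
-- ===== SOURCE B (Python) =====
-- def fib_rabbits(months, litter):
--     """Iterative DP: f(0)=0, f(1)=1, f(n)=f(n-1)+litter*f(n-2)."""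
--     prev, cur = 0, 1
--     for _ in range(months):
--         prev, cur = cur, cur + litter * prev
--     return prev
-- ===== Notes on version B (the rewrite author's own statement) =====
-- stated objective: faster
-- what changed: Replaced the exponential double recursion with a single iterative pass keeping the last two values (bottom-up DP).
import Mathlib
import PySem

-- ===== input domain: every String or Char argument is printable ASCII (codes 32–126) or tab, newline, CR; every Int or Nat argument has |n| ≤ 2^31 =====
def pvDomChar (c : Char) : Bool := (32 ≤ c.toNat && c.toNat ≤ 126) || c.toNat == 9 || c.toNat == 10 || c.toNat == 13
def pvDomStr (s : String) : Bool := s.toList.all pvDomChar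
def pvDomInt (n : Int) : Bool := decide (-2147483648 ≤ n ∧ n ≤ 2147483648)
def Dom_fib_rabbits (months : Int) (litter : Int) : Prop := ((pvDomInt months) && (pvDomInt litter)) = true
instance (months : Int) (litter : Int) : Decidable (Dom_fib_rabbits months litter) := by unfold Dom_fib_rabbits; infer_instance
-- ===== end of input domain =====

-- B replaces A's exponential double recursion by one iterative pass over range(months)
-- keeping the last two values (bottom-up DP); asymptotically faster.


-- ===== PORT A =====
-- Literal port of A's double recursion; the `months ≤ 1` test only bundles the two
-- Python base cases so the recursion is total in Lean (months < 0, where Python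
-- never terminates, is excluded by Pre_fib_rabbits).
def fib_rabbits (months : Int) (litter : Int) : Int :=
  if months ≤ 1 then
    (if months == 0 then 0 else if months == 1 then 1 else 0)
  else
    fib_rabbits (months - 1) litter + litter * fib_rabbits (months - 2) litter
termination_by months.toNat
decreasing_by all_goals omega

-- ===== PORT B =====
-- port of Source B: prev, cur = 0, 1; for _ in range(months): prev, cur = cur, cur + litter*prev
def fib_rabbits_alt (months : Int) (litter : Int) : Int :=
  ((PySem.List.pyRange 0 months 1).foldl
    (fun (p : Int × Int) _ => (p.2, p.2 + litter * p.1)) (0, 1)).1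

-- ===== PRECONDITION & SPEC =====
-- Pre_ excludes months < 0, on which A recurses forever (RecursionError in Python).
def Pre_fib_rabbits (months : Int) (litter : Int) : Prop := 0 ≤ months
instance (months : Int) (litter : Int) : Decidable (Pre_fib_rabbits months litter) := by unfold Pre_fib_rabbits; infer_instance
def pvWitness_fib_rabbits : Int × Int := (6, 3)

def Spec_fib_rabbits (months : Int) (litter : Int) (out : Int) : Prop := out = fib_rabbits_alt months litter
instance (months : Int) (litter : Int) (out : Int) : Decidable (Spec_fib_rabbits months litter out) := by unfold Spec_fib_rabbits; infer_instance

-- ===== CLAIM (what is proved, stated in full; the proofs are below) =====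
def Claim_equal_fib_rabbits : Prop := ∀ (months : Int) (litter : Int), Dom_fib_rabbits months litter → Pre_fib_rabbits months litter → Spec_fib_rabbits months litter (fib_rabbits months litter)
-- ===== LEMMAS AND PROOFS =====

-- The fold ignores the list elements, so it is iteration of the step function.
def fibStep (litter : Int) (p : Int × Int) : Int × Int := (p.2, p.2 + litter * p.1)

theorem foldl_const_eq_iterate (litter : Int) (l : List Int) (p : Int × Int) :
    l.foldl (fun (p : Int × Int) _ => (p.2, p.2 + litter * p.1)) p =
      (fibStep litter)^[l.length] p := by
  induction l generalizing p with
  | nil => rfl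
  | cons x xs ih => simp [List.foldl, Function.iterate_succ_apply, ih, fibStep]

theorem alt_eq_iterate (n : Nat) (litter : Int) :
    fib_rabbits_alt (n : Int) litter = ((fibStep litter)^[n] (0, 1)).1 := by
  unfold fib_rabbits_alt
  rw [foldl_const_eq_iterate]
  simp [PySem.List.length_pyRange_one]

theorem A_eq_iterate (n : Nat) (litter : Int) :
    fib_rabbits (n : Int) litter = ((fibStep litter)^[n] (0, 1)).1 := by
  induction n using Nat.strong_induction_on with
  | _ n ih =>
    match n with
    | 0 => simp [fib_rabbits]
    | 1 => simp [fib_rabbits]; rfl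
    | (m + 2) =>
      rw [fib_rabbits]
      have h1 : ¬ ((m + 2 : Nat) : Int) ≤ 1 := by push_cast; omega
      rw [if_neg h1]
      have e1 : ((m + 2 : Nat) : Int) - 1 = ((m + 1 : Nat) : Int) := by push_cast; ring
      have e2 : ((m + 2 : Nat) : Int) - 2 = ((m : Nat) : Int) := by push_cast; ring
      rw [e1, e2, ih (m + 1) (by omega), ih m (by omega)]
      rw [Function.iterate_succ_apply' (fibStep litter) (m + 1),
          Function.iterate_succ_apply' (fibStep litter) m]
      simp only [fibStep]

-- ===== VERDICT (by name: the statement is the Claim_ definition above) =====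
theorem fib_rabbits_spec : Claim_equal_fib_rabbits := by
  intro months litter _ hpre
  unfold Pre_fib_rabbits at hpre
  unfold Spec_fib_rabbits
  obtain ⟨n, rfl⟩ : ∃ n : Nat, months = (n : Int) :=
    ⟨months.toNat, by omega⟩
  rw [A_eq_iterate, alt_eq_iterate]
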